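-- pv_equiv track=rewrite | github.com/gjones1911/UTK_CONVERGENTSOLAR | _products/ML_Tools.py | string_encoding
-- ===== SOURCE A (Python) =====
-- def string_encoding(dfcol, ):
--     # get the new values to encode
--     to_encode = sorted(list(set(dfcol)))
--     cnt = 0
--     encoding_map = {}
--     for strng in to_encode:
--         encoding_map[strng] = cnt
--         cnt += 1
--     # now make an encoded version of the original column
--     return [encoding_map[strng] for strng in dfcol]
-- ===== SOURCE B (Python) =====
-- def _bisect_left(a, x):
--     # binary search: first index i with a[i] >= x
--     lo, hi = 0, len(a)
--     while lo < hi: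
--         mid = (lo + hi) // 2
--         if a[mid] < x:
--             lo = mid + 1
--         else:
--             hi = mid
--     return lo
--
--
-- def string_encoding(dfcol, ):
--     to_encode = sorted(set(dfcol))
--     return [_bisect_left(to_encode, x) for x in dfcol]
-- ===== Notes on version B (the rewrite author's own statement) =====
-- stated objective: alternative
-- what changed: Drops the counter loop and encoding dict entirely: keeps only the sorted unique list and computes each value's label as its sorted rank by hand-written binary search.
import Mathlib
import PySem

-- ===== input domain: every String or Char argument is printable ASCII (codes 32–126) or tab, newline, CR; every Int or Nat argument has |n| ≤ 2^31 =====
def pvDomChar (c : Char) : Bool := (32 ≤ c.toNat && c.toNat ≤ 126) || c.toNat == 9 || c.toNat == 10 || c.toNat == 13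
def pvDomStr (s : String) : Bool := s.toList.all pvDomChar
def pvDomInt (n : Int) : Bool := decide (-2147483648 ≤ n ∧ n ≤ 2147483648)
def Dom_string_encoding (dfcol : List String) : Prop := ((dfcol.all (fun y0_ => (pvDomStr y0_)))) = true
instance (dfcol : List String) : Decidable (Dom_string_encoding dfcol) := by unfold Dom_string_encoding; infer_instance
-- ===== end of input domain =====

-- B replaces A's counter loop + encoding dict by a binary search for each value's
-- rank in the sorted unique list (alternative data structure, similar cost).

-- ===== PORT A =====
-- encoding_map[strng] always succeeds (strng ∈ to_encode), so getD 0 is exact here.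
def string_encoding (dfcol : List String) : List Int :=
  let to_encode := PySem.List.sorted (PySem.Set.ofList dfcol) (fun x => x) false
  let st := to_encode.foldl
    (fun (p : PySem.Dict String Int × Int) strng => (p.1.insert strng p.2, p.2 + 1))
    (PySem.Dict.empty, 0)
  dfcol.map (fun strng => ((st.1.get? strng).getD 0))

-- ===== PORT B =====
-- hand-written binary search of Source B, step for step (lo, hi, mid = (lo+hi)//2);
-- the fuel argument (≥ hi - lo at the call site) only guarantees termination
def bisectLeft (a : List String) (x : String) : Nat → Nat → Nat → Nat
  | 0, lo, _ => lo
  | fuel + 1, lo, hi =>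
    if lo < hi then
      let mid := (lo + hi) / 2
      -- a[mid] : 0 ≤ lo ≤ mid < hi ≤ len a throughout the loop, so getD is exact
      if a.getD mid "" < x then bisectLeft a x fuel (mid + 1) hi
      else bisectLeft a x fuel lo mid
    else lo

def string_encoding_alt (dfcol : List String) : List Int :=
  let to_encode := PySem.List.sorted (PySem.Set.ofList dfcol) (fun x => x) false
  dfcol.map (fun x => (Int.ofNat (bisectLeft to_encode x to_encode.length 0 to_encode.length)))

-- ===== PRECONDITION & SPEC =====
def Spec_string_encoding (dfcol : List String) (out : List Int) : Prop := out = string_encoding_alt dfcol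
instance (dfcol : List String) (out : List Int) : Decidable (Spec_string_encoding dfcol out) := by unfold Spec_string_encoding; infer_instance

-- ===== CLAIM (what is proved, stated in full; the proofs are below) =====
def Claim_equal_string_encoding : Prop := ∀ (dfcol : List String), Dom_string_encoding dfcol → Spec_string_encoding dfcol (string_encoding dfcol)

-- ===== LEMMAS AND PROOFS =====

-- ghost: length of the leading run of elements < x
def blin : List String → String → Nat
  | [], _ => 0
  | y :: ys, x => if y < x then blin ys x + 1 else 0

theorem blin_lt (l : List String) (x : String) (i : Nat) (hb : i < blin l x)
    (h : i < l.length) : l[i] < x := by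
  induction l generalizing i with
  | nil => simp at h
  | cons y ys ih =>
    simp only [blin] at hb
    by_cases hy : y < x
    · rw [if_pos hy] at hb
      cases i with
      | zero => simpa using hy
      | succ j => simpa using ih j (by omega) (by simpa using Nat.lt_of_succ_lt_succ h)
    · rw [if_neg hy] at hb
      omega

theorem blin_ge (l : List String) (x : String) (hs : l.Pairwise (· < ·)) (i : Nat)
    (hb : blin l x ≤ i) (h : i < l.length) : ¬ l[i] < x := by
  induction l generalizing i with
  | nil => simp at h
  | cons y ys ih =>
    rcases List.pairwise_cons.mp hs with ⟨hy, hys⟩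
    simp only [blin] at hb
    by_cases hyx : y < x
    · rw [if_pos hyx] at hb
      cases i with
      | zero => omega
      | succ j => simpa using ih hys j (by omega) (by simpa using Nat.lt_of_succ_lt_succ h)
    · cases i with
      | zero => simpa using hyx
      | succ j =>
        have hj : j < ys.length := by simpa using Nat.lt_of_succ_lt_succ h
        have : y < ys[j]'hj := hy _ (List.getElem_mem hj)
        simp only [List.getElem_cons_succ]
        intro hlt
        exact hyx (lt_trans this hlt)

theorem blin_le_length (l : List String) (x : String) : blin l x ≤ l.length := by
  induction l with
  | nil => simp [blin]
  | cons y ys ih =>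
    simp only [blin]
    split
    · simpa using ih
    · simp

theorem bisectLeft_eq_blin (a : List String) (x : String) (hs : a.Pairwise (· < ·)) :
    ∀ fuel lo hi, hi - lo ≤ fuel → lo ≤ hi → hi ≤ a.length →
      (∀ i, i < lo → ∀ h : i < a.length, a[i] < x) →
      (∀ i, hi ≤ i → ∀ h : i < a.length, ¬ a[i] < x) →
      bisectLeft a x fuel lo hi = blin a x := by
  intro fuel
  induction fuel with
  | zero =>
    intro lo hi hf hle hhi hlo hhi2
    have hlh : lo = hi := by omega
    subst hlh
    show lo = blin a x
    have h1 : blin a x ≤ lo := by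
      by_contra hc
      rw [Nat.not_le] at hc
      have hl : lo < a.length := by
        have := blin_le_length a x; omega
      exact hhi2 lo (by omega) hl (blin_lt a x lo hc hl)
    have h2 : lo ≤ blin a x := by
      by_contra hc
      rw [Nat.not_le] at hc
      have hl : blin a x < a.length := by omega
      exact blin_ge a x hs (blin a x) le_rfl hl (hlo _ hc hl)
    omega
  | succ fuel ih =>
    intro lo hi hf hle hhi hlo hhi2
    by_cases hlt : lo < hi
    · rw [bisectLeft, if_pos hlt]
      have hmlen : (lo + hi) / 2 < a.length := by omega
      show (if a.getD ((lo + hi) / 2) "" < x then bisectLeft a x fuel ((lo + hi) / 2 + 1) hi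
        else bisectLeft a x fuel lo ((lo + hi) / 2)) = blin a x
      rw [List.getD_eq_getElem a "" hmlen]
      by_cases hm : a[(lo + hi) / 2]'hmlen < x
      · rw [if_pos hm]
        exact ih ((lo + hi) / 2 + 1) hi (by omega) (by omega) hhi
          (fun i hi' h => by
            rcases Nat.lt_or_ge i ((lo + hi) / 2) with h2 | h2
            · exact lt_trans (List.pairwise_iff_getElem.mp hs i _ h hmlen h2) hm
            · have : i = (lo + hi) / 2 := by omega
              subst this; exact hm)
          hhi2
      · rw [if_neg hm]
        exact ih lo ((lo + hi) / 2) (by omega) (by omega) (by omega) hlo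
          (fun i hi' h => by
            rcases Nat.eq_or_lt_of_le hi' with h3 | h3
            · subst h3; exact hm
            · intro hlt2
              exact hm (lt_trans (List.pairwise_iff_getElem.mp hs _ i hmlen h h3) hlt2))
    · rw [bisectLeft, if_neg hlt]
      have hlh : lo = hi := by omega
      subst hlh
      have h1 : blin a x ≤ lo := by
        by_contra hc
        rw [Nat.not_le] at hc
        have hl : lo < a.length := by
          have := blin_le_length a x; omega
        exact hhi2 lo (by omega) hl (blin_lt a x lo hc hl)
      have h2 : lo ≤ blin a x := by
        by_contra hc
        rw [Nat.not_le] at hc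
        have hl : blin a x < a.length := by omega
        exact blin_ge a x hs (blin a x) le_rfl hl (hlo _ hc hl)
      omega

-- keys not in l leave the folded dict's entry unchanged
theorem fold_get?_not_mem (l : List String) (x : String) (hx : x ∉ l) :
    ∀ (d : PySem.Dict String Int) (c : Int),
      ((l.foldl (fun (p : PySem.Dict String Int × Int) s => (p.1.insert s p.2, p.2 + 1))
        (d, c)).1).get? x = d.get? x := by
  induction l with
  | nil => intro d c; rfl
  | cons y ys ih =>
    intro d c
    have hne : y ≠ x := fun h => hx (h ▸ List.mem_cons_self)
    simp only [List.foldl_cons]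
    rw [ih (fun h => hx (List.mem_cons_of_mem _ h))]
    exact PySem.Dict.get?_insert_of_ne d c hne.symm

theorem fold_get?_mem (l : List String) (x : String) (hs : l.Pairwise (· < ·)) (hx : x ∈ l) :
    ∀ (d : PySem.Dict String Int) (c : Int),
      ((l.foldl (fun (p : PySem.Dict String Int × Int) s => (p.1.insert s p.2, p.2 + 1))
        (d, c)).1).get? x = some (c + (blin l x : Int)) := by
  induction l with
  | nil => simp at hx
  | cons y ys ih =>
    intro d c
    rcases List.pairwise_cons.mp hs with ⟨hy, hys⟩
    simp only [List.foldl_cons]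
    by_cases hxy : x = y
    · subst hxy
      have hnot : x ∉ ys := fun h => lt_irrefl x (hy x h)
      rw [fold_get?_not_mem ys x hnot]
      rw [PySem.Dict.get?_insert_self]
      simp [blin]
    · have hxys : x ∈ ys := by
        rcases List.mem_cons.mp hx with h | h
        · exact absurd h hxy
        · exact h
      rw [ih hys hxys]
      have hyx : y < x := hy x hxys
      simp only [blin, if_pos hyx]
      congr 1
      push_cast
      ring

theorem string_encoding_eq (dfcol : List String) :
    string_encoding dfcol = string_encoding_alt dfcol := by
  unfold string_encoding string_encoding_alt
  apply List.map_congr_left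
  intro x hx
  set l := PySem.List.sorted (PySem.Set.ofList dfcol) (fun x => x) false with hl
  have hs : l.Pairwise (· < ·) := PySem.List.sorted_ofList_pairwise_lt dfcol
  have hxl : x ∈ l := by
    rw [hl, PySem.List.mem_sorted]
    exact (PySem.Set.mem_ofList dfcol x).mpr hx
  rw [fold_get?_mem l x hs hxl PySem.Dict.empty 0]
  rw [bisectLeft_eq_blin l x hs l.length 0 l.length (by omega) (Nat.zero_le _) le_rfl
    (fun i hi _ => absurd hi (Nat.not_lt_zero i))
    (fun i hi h => absurd h (by omega))]
  simp

-- ===== VERDICT (by name: the statement is the Claim_ definition above) =====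
theorem string_encoding_spec : Claim_equal_string_encoding := by
  intro dfcol _
  unfold Spec_string_encoding
  exact string_encoding_eq dfcol
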